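-- pv_equiv track=rewrite | github.com/MichaelRice1/EgoDrive | notebooks_and_scripts/vrs_extractor.py | join_action_interval
-- ===== SOURCE A (Python) =====
-- def join_action_interval(action_tracking):
--     joined_actions = {}
--
--     for action, frames in action_tracking.items():
--         if not frames:
--             continue
--
--         # Sort frames and join consecutive intervals
--         frames = sorted(frames)
--         intervals = []
--         start = frames[0]
--         end = frames[0]
--
--         for f in frames[1:]:
--             if f == end + 1:  # Consecutive frame
--                 end = f
--             else:
--                 if action == "Mobile Phone":
--                     if intervals:
--                         if start > intervals[-1][1] + 10:
--                             intervals.append([start, end])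
--                         else:
--                             intervals[-1][1] = end
--                     else:
--                         intervals.append([start, end])
--                 else:
--                     if (end - start) > 5:
--                         intervals.append([start, end])
--
--                 start = f
--                 end = f
--
--          # Extend last interval to include the last frame
--         intervals.append((start, end))  # Add last interval
--         joined_actions[action] = intervals
--
--     return joined_actions
-- ===== SOURCE B (Python) =====
-- def join_action_interval(action_tracking):
--     joined_actions = {}
--     for action, frames in action_tracking.items():
--         if not frames:
--             continue
--         # Pass 1: maximal runs of consecutive frames, as (start, end) pairs.
--         fs = sorted(frames)
--         runs = []
--         s = e = fs[0]
--         for f in fs[1:]: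
--             if f == e + 1:
--                 e = f
--             else:
--                 runs.append((s, e))
--                 s = e = f
--         runs.append((s, e))
--         # Pass 2: per-action post-processing of all runs but the last;
--         # the final run is always appended as a tuple, unfiltered.
--         body, last = runs[:-1], runs[-1]
--         if action == "Mobile Phone":
--             intervals = []
--             for s, e in body:
--                 if intervals and s <= intervals[-1][1] + 10:
--                     intervals[-1][1] = e
--                 else:
--                     intervals.append([s, e])
--         else:
--             intervals = [[s, e] for s, e in body if e - s > 5]
--         intervals.append(last)
--         joined_actions[action] = intervals
--     return joined_actions
-- ===== Notes on version B (the rewrite author's own statement) =====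
-- stated objective: alternative
-- what changed: B splits A's single stateful scan into two passes: first it builds the list of maximal consecutive runs, then a second pass applies the per-action merge/filter rules to all runs but the last and appends the final run unconditionally, replacing A's interleaved break-time branching.
import Mathlib
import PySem

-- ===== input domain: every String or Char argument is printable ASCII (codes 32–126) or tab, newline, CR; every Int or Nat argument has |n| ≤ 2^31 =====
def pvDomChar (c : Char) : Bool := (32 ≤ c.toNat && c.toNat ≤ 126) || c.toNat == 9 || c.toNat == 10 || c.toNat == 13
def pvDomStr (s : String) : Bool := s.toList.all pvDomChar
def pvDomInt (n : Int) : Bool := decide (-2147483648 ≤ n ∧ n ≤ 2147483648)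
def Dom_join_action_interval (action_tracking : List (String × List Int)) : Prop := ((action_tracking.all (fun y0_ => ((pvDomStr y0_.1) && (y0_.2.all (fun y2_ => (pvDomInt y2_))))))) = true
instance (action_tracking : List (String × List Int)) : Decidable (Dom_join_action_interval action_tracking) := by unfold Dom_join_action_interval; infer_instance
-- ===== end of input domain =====

-- B restructures A's single stateful scan into two passes (runs, then per-action
-- post-processing); objective: alternative decomposition, same cost. Return-value
-- equivalence only (neither side mutates its argument observably).

-- ===== PORT A =====
-- one break step of A's inner loop (the state is (intervals, start, end));
-- `intervals[-1][1] = end` rewrites the second slot of the (length-2) last interval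
def stepA (action : String) (st : List (List Int) × Int × Int) (f : Int) : List (List Int) × Int × Int :=
  match st with
  | (intervals, s, e) =>
    if f = e + 1 then (intervals, s, f)
    else
      let intervals' :=
        if action = "Mobile Phone" then
          match intervals.getLast? with
          | some last =>
            if s > last.getD 1 0 + 10 then intervals ++ [[s, e]]
            else intervals.dropLast ++ [[last.getD 0 0, e]]
          | none => intervals ++ [[s, e]]
        else
          if e - s > 5 then intervals ++ [[s, e]] else intervals
      (intervals', f, f)

def processA (action : String) (frames : List Int) : List (List Int) :=
  match PySem.List.sorted frames (fun x => x) false with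
  | [] => []   -- unreachable: the caller skips empty frame lists
  | f0 :: rest =>
    match rest.foldl (stepA action) ([], f0, f0) with
    | (intervals, s, e) => intervals ++ [[s, e]]

def join_action_interval (action_tracking : List (String × List Int)) : List (String × List (List Int)) :=
  (action_tracking.foldl
    (fun d p => if p.2 = [] then d else d.insert p.1 (processA p.1 p.2))
    (PySem.Dict.empty : PySem.Dict String (List (List Int)))).items

-- ===== PORT B =====
-- pass 1: collect maximal consecutive runs as (start, end) pairs
def stepRuns (st : List (Int × Int) × Int × Int) (f : Int) : List (Int × Int) × Int × Int :=
  match st with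
  | (runs, s, e) => if f = e + 1 then (runs, s, f) else (runs ++ [(s, e)], f, f)

-- pass 2, "Mobile Phone" rule: merge a run into the last interval when it starts within 10
def stepMP (intervals : List (List Int)) (r : Int × Int) : List (List Int) :=
  match intervals.getLast? with
  | some l =>
    if r.1 ≤ l.getD 1 0 + 10 then intervals.dropLast ++ [[l.getD 0 0, r.2]]
    else intervals ++ [[r.1, r.2]]
  | none => intervals ++ [[r.1, r.2]]

def processB (action : String) (frames : List Int) : List (List Int) :=
  match PySem.List.sorted frames (fun x => x) false with
  | [] => []   -- unreachable: the caller skips empty frame lists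
  | f0 :: rest =>
    match rest.foldl stepRuns ([], f0, f0) with
    | (r, s, e) =>
      let runs := r ++ [(s, e)]
      let body := runs.dropLast
      let last := runs.getLast?.getD (0, 0)   -- runs[-1]; runs is nonempty by construction
      let intervals :=
        if action = "Mobile Phone" then body.foldl stepMP []
        else (body.filter (fun p => p.2 - p.1 > 5)).map (fun p => [p.1, p.2])
      intervals ++ [[last.1, last.2]]

def join_action_interval_alt (action_tracking : List (String × List Int)) : List (String × List (List Int)) :=
  (action_tracking.foldl
    (fun d p => if p.2 = [] then d else d.insert p.1 (processB p.1 p.2))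
    (PySem.Dict.empty : PySem.Dict String (List (List Int)))).items

-- ===== PRECONDITION & SPEC =====
def Spec_join_action_interval (action_tracking : List (String × List Int)) (out : List (String × List (List Int))) : Prop := out = join_action_interval_alt action_tracking
instance (action_tracking : List (String × List Int)) (out : List (String × List (List Int))) : Decidable (Spec_join_action_interval action_tracking out) := by unfold Spec_join_action_interval; infer_instance

-- ===== CLAIM (what is proved, stated in full; the proofs are below) =====
def Claim_equal_join_action_interval : Prop := ∀ (action_tracking : List (String × List Int)), Dom_join_action_interval action_tracking → Spec_join_action_interval action_tracking (join_action_interval action_tracking)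

-- ===== LEMMAS AND PROOFS =====

-- B's post-processing of a run list, per action
def post (action : String) (R : List (Int × Int)) : List (List Int) :=
  if action = "Mobile Phone" then R.foldl stepMP []
  else (R.filter (fun p => p.2 - p.1 > 5)).map (fun p => [p.1, p.2])

lemma post_nil (action : String) : post action [] = [] := by
  unfold post; split <;> rfl

lemma post_concat (action : String) (R : List (Int × Int)) (s e : Int) :
    post action (R ++ [(s, e)]) =
      (if action = "Mobile Phone" then
        match (post action R).getLast? with
        | some last =>
          if s > last.getD 1 0 + 10 then post action R ++ [[s, e]]
          else (post action R).dropLast ++ [[last.getD 0 0, e]]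
        | none => post action R ++ [[s, e]]
      else
        if e - s > 5 then post action R ++ [[s, e]] else post action R) := by
  unfold post
  by_cases h : action = "Mobile Phone"
  · subst h
    simp only [if_true, List.foldl_append, List.foldl_cons, List.foldl_nil]
    cases hl : (List.foldl stepMP [] R).getLast? with
    | none => simp [stepMP, hl]
    | some l =>
      simp only [stepMP, hl]
      split_ifs with h1 h2 <;> first | rfl | omega
  · simp only [if_neg h, List.filter_append, List.map_append, List.filter_cons,
      List.filter_nil]
    by_cases h5 : e - s > 5
    · simp [h5]
    · simp [h5]

lemma fold_inv (action : String) (l : List Int) :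
    ∀ (R : List (Int × Int)) (s e : Int),
      l.foldl (stepA action) (post action R, s, e) =
        (fun t => (post action t.1, t.2.1, t.2.2)) (l.foldl stepRuns (R, s, e)) := by
  induction l with
  | nil => intro R s e; rfl
  | cons f t ih =>
    intro R s e
    simp only [List.foldl_cons]
    by_cases hf : f = e + 1
    · rw [show stepA action (post action R, s, e) f = (post action R, s, f) by
        unfold stepA; simp [hf],
        show stepRuns (R, s, e) f = (R, s, f) by unfold stepRuns; simp [hf]]
      exact ih R s f
    · rw [show stepRuns (R, s, e) f = (R ++ [(s, e)], f, f) by unfold stepRuns; simp [hf]]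
      rw [show stepA action (post action R, s, e) f = (post action (R ++ [(s, e)]), f, f) by
        unfold stepA; simp only [if_neg hf]; rw [post_concat]]
      exact ih (R ++ [(s, e)]) f f

lemma process_eq (action : String) (frames : List Int) :
    processA action frames = processB action frames := by
  unfold processA processB
  cases PySem.List.sorted frames (fun x => x) false with
  | nil => rfl
  | cons f0 rest =>
    simp only
    have h := fold_inv action rest [] f0 f0
    rw [post_nil] at h
    rw [h]
    cases hfr : rest.foldl stepRuns ([], f0, f0) with
    | mk r se =>
      cases se with
      | mk s e =>
        simp only [List.dropLast_concat, List.getLast?_concat, Option.getD_some]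
        unfold post
        rfl

theorem join_action_interval_spec : Claim_equal_join_action_interval := by
  intro action_tracking _
  unfold Spec_join_action_interval join_action_interval join_action_interval_alt
  have : (fun (d : PySem.Dict String (List (List Int))) (p : String × List Int) =>
            if p.2 = [] then d else d.insert p.1 (processA p.1 p.2)) =
         (fun d p => if p.2 = [] then d else d.insert p.1 (processB p.1 p.2)) := by
    funext d p; rw [process_eq]
  rw [this]
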